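-- pv_equiv track=rewrite | github.com/MartinEngelstad/ITGK | Oving06/strengmanipulasjon.py | func
-- ===== SOURCE A (Python) =====
-- def find_substring_indexes(str1,str2):
--     str1 = str1.lower()
--     str2 = str2.lower()
--     list = []
--     for i in range(len(str2)): #check all possible starting letters for substrings
--         if str1 in str2[i:i+len(str1)]: #if str1 in substring of str2
--             list.append(i) #append index of substring
--     return list
--
-- def func(str1,str2,str3):
--     str3.lower()
--     list = find_substring_indexes(str1,str2) #list of substring indexes
--     newStr = ''
--     for i in range(len(list)): #replacing same number of substrings as list elmnts
--         if i == 0: #for first elmnt, add start of str2, str3 and str2 up to next substring index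
--             newStr += str2[:list[i]]+str3+str2[list[i]+len(str1):list[i+1]]
--         elif i == len(list)-1: #for last element, add str3 and rest of str2
--             newStr += str3+str2[list[i]+len(str1):]
--         else: #for middle elements, add str3 and str2 up to next substring index
--             newStr += str3+str2[list[i]+len(str1):list[i+1]]
--     return newStr
-- ===== SOURCE B (Python) =====
-- def func(str1, str2, str3):
--     # Single left-to-right pass over str2: no index list, no slicing. At each position
--     # test a case-insensitive match with startswith; on a match emit str3 and start
--     # suppressing the next len(str1) original characters (an overlapping later match
--     # restarts the window, which reproduces A's overlapping-match stitching). Like A,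
--     # the result is '' when str1 never occurs (A's loop then emits nothing).
--     low1 = str1.lower()
--     low2 = str2.lower()
--     m = len(str1)
--     out = []
--     suppress = 0  # original characters still covered by the most recent match
--     matched = False
--     for i in range(len(str2)):
--         if low2.startswith(low1, i):
--             out.append(str3)
--             suppress = m
--             matched = True
--         if suppress:
--             suppress -= 1
--         else:
--             out.append(str2[i])
--     return ''.join(out) if matched else ''
-- ===== Notes on version B (the rewrite author's own statement) =====
-- stated objective: faster
-- what changed: B is a single left-to-right character state machine - at each position one case-insensitive startswith test that either emits str3 (restarting a suppression counter over the next len(str1) characters) or copies/suppresses the current character, joined once at the end - instead of A's first pass building a length-m slice at every position to collect a list of all match indices and second pass stitching prefix/replacement/gap slices with three index-keyed branches via repeated string +=.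
-- crash fix: On inputs where str1 matches at exactly one position A raises IndexError (it reads list[i+1] of a one-element index list); B returns the string with that single occurrence replaced. — e.g. on func("a", "a", "x"): A raises IndexError, B returns "x"
import Mathlib
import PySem

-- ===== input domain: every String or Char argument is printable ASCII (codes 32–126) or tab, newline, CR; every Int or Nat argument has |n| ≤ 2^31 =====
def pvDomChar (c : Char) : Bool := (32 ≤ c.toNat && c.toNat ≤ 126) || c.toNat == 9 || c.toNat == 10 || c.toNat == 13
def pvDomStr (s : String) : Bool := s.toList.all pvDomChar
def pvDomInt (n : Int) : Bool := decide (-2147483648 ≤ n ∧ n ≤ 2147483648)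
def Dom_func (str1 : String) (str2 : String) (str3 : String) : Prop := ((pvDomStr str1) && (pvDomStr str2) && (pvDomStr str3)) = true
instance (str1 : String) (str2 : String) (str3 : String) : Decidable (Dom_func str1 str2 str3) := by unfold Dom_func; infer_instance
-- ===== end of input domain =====

-- B replaces A's two staged passes (collect all match indices, then stitch slices with three
-- index-keyed branches) by a single left-to-right character state machine with a suppression
-- counter; like A, it returns '' when str1 never occurs in str2 (A's loop then emits nothing).

-- ===== PORT A =====
-- find_substring_indexes(str1, str2): collect every i with str1.lower() in str2.lower()[i:i+len(str1)]
def findSubstringIndexes (str1 str2 : String) : List Int :=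
  let s1 := (PySem.Str.lower str1).toList
  let s2 := (PySem.Str.lower str2).toList
  (PySem.List.pyRange 0 (s2.length : Int) 1).foldl
    (fun acc i =>
      if PySem.Chars.isIn s1 (PySem.List.slice s2 (some i) (some (i + (s1.length : Int)))) then
        acc ++ [i]
      else acc) []

-- the three-branch replacement loop over the index list; where Python raises IndexError
-- (list[i+1] with a single-element list) the port reads a dummy 0 via pyGetD — exactly those
-- inputs are excluded by Pre_func
def func (str1 : String) (str2 : String) (str3 : String) : String :=
  let _ := PySem.Str.lower str3   -- str3.lower() computed and discarded, as in A
  let l := findSubstringIndexes str1 str2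
  (PySem.List.pyRange 0 (l.length : Int) 1).foldl
    (fun acc i => acc ++
      (if i = 0 then
        PySem.List.slice str2.toList none (some (PySem.List.pyGetD l i 0)) ++ str3.toList ++
          PySem.List.slice str2.toList (some (PySem.List.pyGetD l i 0 + (str1.toList.length : Int)))
            (some (PySem.List.pyGetD l (i + 1) 0))
      else if i = (l.length : Int) - 1 then
        str3.toList ++ PySem.List.slice str2.toList (some (PySem.List.pyGetD l i 0 + (str1.toList.length : Int))) none
      else
        str3.toList ++ PySem.List.slice str2.toList (some (PySem.List.pyGetD l i 0 + (str1.toList.length : Int)))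
          (some (PySem.List.pyGetD l (i + 1) 0)))) []
    |> String.ofList

-- ===== PORT B =====
-- the loop body of Source B: state = (out pieces, suppress, matched); Python's
-- low2.startswith(low1, i) (0 ≤ i ≤ len) is exactly 'low1 <+: low2.drop i' — ported by hand,
-- PySem has no startswith-with-start; suppress stays ≥ 0 in Python, so it is a Nat here
def altStep (low1 low2 s2 s3l : List Char) (m : Nat)
    (st : List (List Char) × Nat × Bool) (i : Int) : List (List Char) × Nat × Bool :=
  let st' := if low1 <+: low2.drop i.toNat then (st.1 ++ [s3l], m, true) else st
  if 0 < st'.2.1 then (st'.1, st'.2.1 - 1, st'.2.2)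
  else (st'.1 ++ [[PySem.List.pyGetD s2 i ' ']], st'.2.1, st'.2.2)

-- single pass for i in range(len(str2)); ''.join(out) if matched else ''
def func_alt (str1 : String) (str2 : String) (str3 : String) : String :=
  let low1 := (PySem.Str.lower str1).toList
  let low2 := (PySem.Str.lower str2).toList
  let m := str1.toList.length   -- m = len(str1)
  let r := (PySem.List.pyRange 0 (str2.toList.length : Int) 1).foldl
    (altStep low1 low2 str2.toList str3.toList m) ([], 0, false)
  if r.2.2 then String.ofList r.1.flatten else ""

-- ===== PRECONDITION & SPEC =====
-- number of (possibly overlapping, case-insensitive) match starts of str1 in str2 (= A's index-list length)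
def occCount (str1 str2 : String) : Nat :=
  ((List.range str2.toList.length).filter
    (fun i => decide ((PySem.Chars.lower str1.toList) <+: ((PySem.Chars.lower str2.toList).drop i)))).length

-- Pre_ excludes exactly the inputs with one single match start, on which A raises IndexError
-- (list[i+1] past the end of a one-element index list)
def Pre_func (str1 : String) (str2 : String) (str3 : String) : Prop :=
  occCount str1 str2 ≠ 1
instance (str1 : String) (str2 : String) (str3 : String) : Decidable (Pre_func str1 str2 str3) := by
  unfold Pre_func; infer_instance

def pvWitness_func : String × String × String := ("a", "aba", "x")

-- A raises IndexError exactly when str1 matches at exactly one position; B returns the replaced string there.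
def Raises_func (str1 : String) (str2 : String) (str3 : String) : Prop :=
  occCount str1 str2 = 1
instance (str1 : String) (str2 : String) (str3 : String) : Decidable (Raises_func str1 str2 str3) := by
  unfold Raises_func; infer_instance
def pvRaiseWitness_func : String × String × String := ("a", "a", "x")
def pvRaiseWitnessOut_func : String := "x"

def Spec_func (str1 : String) (str2 : String) (str3 : String) (out : String) : Prop := out = func_alt str1 str2 str3
instance (str1 : String) (str2 : String) (str3 : String) (out : String) : Decidable (Spec_func str1 str2 str3 out) := by unfold Spec_func; infer_instance

-- ===== CLAIM (what is proved, stated in full; the proofs are below) =====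
def Claim_equal_func : Prop := ∀ (str1 : String) (str2 : String) (str3 : String), Dom_func str1 str2 str3 → Pre_func str1 str2 str3 → Spec_func str1 str2 str3 (func str1 str2 str3)
def Claim_raises_func : Prop := (∀ (str1 : String) (str2 : String) (str3 : String), Dom_func str1 str2 str3 → Raises_func str1 str2 str3 → ¬ Pre_func str1 str2 str3) ∧ (Dom_func (pvRaiseWitness_func.1) (pvRaiseWitness_func.2.1) (pvRaiseWitness_func.2.2) ∧ Raises_func (pvRaiseWitness_func.1) (pvRaiseWitness_func.2.1) (pvRaiseWitness_func.2.2) ∧ func_alt (pvRaiseWitness_func.1) (pvRaiseWitness_func.2.1) (pvRaiseWitness_func.2.2) = pvRaiseWitnessOut_func)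

-- ===== LEMMAS AND PROOFS =====

-- the (sorted) list of match starts from position 'start' on
def occsFrom (low1 low2 : List Char) (start : Nat) : List Nat :=
  if _h : start < low2.length then
    (if low1 <+: low2.drop start then [start] else []) ++ occsFrom low1 low2 (start + 1)
  else []
termination_by low2.length - start

theorem occsFrom_eq_filter (low1 low2 : List Char) (start : Nat) :
    occsFrom low1 low2 start =
      (List.range' start (low2.length - start)).filter (fun i => decide (low1 <+: low2.drop i)) := by
  rw [occsFrom]
  split
  · rename_i hlt
    have : low2.length - start = (low2.length - (start + 1)) + 1 := by omega
    rw [this, List.range'_succ, List.filter_cons, occsFrom_eq_filter low1 low2 (start + 1)]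
    by_cases h : low1 <+: List.drop start low2 <;> simp [h]
  · rename_i hge
    have : low2.length - start = 0 := by omega
    simp [this]
termination_by low2.length - start

theorem occsFrom_mem (low1 low2 : List Char) (start : Nat) :
    ∀ o ∈ occsFrom low1 low2 start, start ≤ o := by
  intro o ho
  rw [occsFrom_eq_filter] at ho
  have := List.mem_range'.mp (List.mem_of_mem_filter ho)
  omega

theorem lower_length (l : List Char) : (PySem.Chars.lower l).length = l.length := by
  simp [PySem.Chars.lower]

theorem isIn_take_eq (low1 t : List Char) :
    PySem.Chars.isIn low1 (t.take low1.length) = decide (low1 <+: t) := by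
  by_cases hp : low1 <+: t
  · rw [← List.prefix_iff_eq_take.mp hp]
    simp only [hp, decide_true]
    rw [PySem.Chars.isIn_iff_infix]
  · simp only [hp, decide_false]
    by_contra hne
    have hin : low1 <:+: t.take low1.length := by
      rw [← PySem.Chars.isIn_iff_infix]
      revert hne
      cases PySem.Chars.isIn low1 (List.take low1.length t) <;> simp
    have hlen : (t.take low1.length).length ≤ low1.length := by simp
    have heq : low1 = t.take low1.length :=
      hin.eq_of_length (le_antisymm hin.length_le hlen)
    exact hp (heq ▸ List.take_prefix _ _)

theorem findSubstringIndexes_eq (str1 str2 : String) :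
    findSubstringIndexes str1 str2 =
      List.map (fun k : Nat => (k : Int))
        (occsFrom (PySem.Chars.lower str1.toList) (PySem.Chars.lower str2.toList) 0) := by
  unfold findSubstringIndexes
  simp only [PySem.Str.toList_lower]
  set low1 := PySem.Chars.lower str1.toList with hl1
  set low2 := PySem.Chars.lower str2.toList with hl2
  rw [PySem.List.pyRange_zero_natCast]
  rw [PySem.List.foldl_append_if (fun i => PySem.Chars.isIn low1 (PySem.List.slice low2 (some i) (some (i + (low1.length : Int))))) (fun i => i)]
  rw [List.filter_map, List.map_map]
  rw [occsFrom_eq_filter, Nat.sub_zero, ← List.range_eq_range']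
  rw [List.nil_append]
  congr 1
  apply List.filter_congr
  intro i _
  simp only [Function.comp_apply]
  have : ((i : Int) + (low1.length : Int)) = ((i + low1.length : Nat) : Int) := by push_cast; ring
  rw [this, PySem.List.slice_natCast]
  have : i + low1.length - i = low1.length := by omega
  rw [this, isIn_take_eq low1 _]

-- the common closed form both programs reach: pieces of str2 between the match starts,
-- each match start replaced by s3; f = the first position whose original character survives
def stitchF (s2 s3 : List Char) (m : Nat) : List Nat → Nat → List Char
  | [], f => s2.drop f
  | o :: os, f => (s2.drop f).take (o - f) ++ s3 ++ stitchF s2 s3 m os (o + m)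

theorem stitchF_cons_char (s2 s3 : List Char) (m : Nat) (os : List Nat) (i : Nat)
    (hi : i < s2.length) (h : ∀ o ∈ os, i < o) :
    stitchF s2 s3 m os i = s2.getD i ' ' :: stitchF s2 s3 m os (i + 1) := by
  cases os with
  | nil =>
    simp only [stitchF]
    rw [List.getD_eq_getElem s2 ' ' hi, List.drop_eq_getElem_cons hi]
  | cons o os' =>
    have hio : i < o := h o (by simp)
    simp only [stitchF]
    rw [List.drop_eq_getElem_cons hi]
    have : o - i = (o - (i + 1)) + 1 := by omega
    rw [this, List.take_succ_cons, List.getD_eq_getElem s2 ' ' hi, List.cons_append,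
      List.cons_append]

-- B's state machine, one position at a time (mirrors altStep; values are Nat since 0 ≤ i, 0 ≤ suppress)
def emitSM (low1 low2 s2 s3l : List Char) (m : Nat) (i s : Nat) : List Char :=
  if _h : i < low2.length then
    let mt := decide (low1 <+: low2.drop i)
    let s' := if mt then m else s
    (if mt then s3l else []) ++ (if 0 < s' then [] else [s2.getD i ' ']) ++
      emitSM low1 low2 s2 s3l m (i + 1) (s' - 1)
  else []
termination_by low2.length - i

theorem emitSM_eq_stitchF (low1 low2 s2 s3l : List Char) (m : Nat)
    (hlen : low2.length = s2.length) (i s : Nat) :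
    emitSM low1 low2 s2 s3l m i s = stitchF s2 s3l m (occsFrom low1 low2 i) (i + s) := by
  rw [emitSM, occsFrom]
  split
  · rename_i hlt
    have ih := emitSM_eq_stitchF low1 low2 s2 s3l m hlen (i + 1)
    have hmem : ∀ o ∈ occsFrom low1 low2 (i + 1), i < o := by
      intro o ho; have := occsFrom_mem low1 low2 (i + 1) o ho; omega
    by_cases hmt : low1 <+: low2.drop i
    · simp only [hmt, decide_true, if_true, List.singleton_append]
      by_cases hm : 0 < m
      · simp only [hm, if_true]
        rw [ih (m - 1)]
        simp only [stitchF]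
        have h1 : i - (i + s) = 0 := by omega
        have h2 : i + 1 + (m - 1) = i + m := by omega
        simp [h1, h2]
      · have hm0 : m = 0 := by omega
        subst hm0
        simp only [Nat.lt_irrefl, if_false]
        rw [ih 0]
        simp only [stitchF]
        have h1 : i - (i + s) = 0 := by omega
        have hc := stitchF_cons_char s2 s3l 0 (occsFrom low1 low2 (i + 1)) i (by omega) hmem
        simp [h1, hc]
    · simp only [hmt, decide_false, Bool.false_eq_true, if_false, List.nil_append]
      by_cases hs : 0 < s
      · simp only [hs, if_true, List.nil_append]
        rw [ih (s - 1)]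
        have h2 : i + 1 + (s - 1) = i + s := by omega
        rw [h2]
      · have hs0 : s = 0 := by omega
        subst hs0
        simp only [Nat.lt_irrefl, if_false]
        rw [ih 0]
        have hc := stitchF_cons_char s2 s3l m (occsFrom low1 low2 (i + 1)) i (by omega) hmem
        simp [hc]
  · rename_i hge
    simp only [stitchF]
    symm
    apply List.drop_eq_nil_of_le
    omega
termination_by low2.length - i

theorem alt_fold (low1 low2 s2 s3l : List Char) (m : Nat) (hlen : low2.length = s2.length) :
    ∀ (i : Nat), i ≤ low2.length → ∀ (acc : List (List Char)) (s : Nat) (b : Bool),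
      (((PySem.List.pyRange (i : Int) (low2.length : Int) 1).foldl
          (altStep low1 low2 s2 s3l m) (acc, s, b)).1.flatten
        = acc.flatten ++ emitSM low1 low2 s2 s3l m i s)
      ∧ ((PySem.List.pyRange (i : Int) (low2.length : Int) 1).foldl
          (altStep low1 low2 s2 s3l m) (acc, s, b)).2.2
        = (b || decide (occsFrom low1 low2 i ≠ [])) := by
  intro i
  induction hn : low2.length - i using Nat.strong_induction_on generalizing i with
  | _ n ih =>
    intro hi acc s b
    rcases Nat.eq_or_lt_of_le hi with heq | hlt
    · rw [heq, PySem.List.pyRange_one_eq_nil (by omega), occsFrom, dif_neg (by omega)]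
      rw [emitSM, dif_neg (by omega)]
      simp
    · have hcons : PySem.List.pyRange (i : Int) (low2.length : Int) 1
          = (i : Int) :: PySem.List.pyRange ((i + 1 : Nat) : Int) (low2.length : Int) 1 := by
        rw [PySem.List.pyRange_one_cons (by exact_mod_cast hlt)]
        norm_num
      rw [hcons, List.foldl_cons]
      have hstep : altStep low1 low2 s2 s3l m (acc, s, b) (i : Int)
          = let st' := if low1 <+: low2.drop i then (acc ++ [s3l], m, true) else (acc, s, b)
            if 0 < st'.2.1 then (st'.1, st'.2.1 - 1, st'.2.2)
            else (st'.1 ++ [[s2.getD i ' ']], st'.2.1, st'.2.2) := by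
        simp [altStep, PySem.List.pyGetD_natCast]
      have ihx := ih (low2.length - (i + 1)) (by omega) (i + 1) rfl (by omega)
      rw [emitSM, dif_pos hlt, occsFrom, dif_pos hlt]
      by_cases hmt : low1 <+: low2.drop i
      · simp only [hmt, if_true, decide_true, List.singleton_append] at hstep ⊢
        by_cases hm : 0 < m
        · simp only [hm, if_true] at hstep ⊢
          rw [hstep]
          obtain ⟨h1, h2⟩ := ihx (acc ++ [s3l]) (m - 1) true
          exact ⟨by rw [h1]; simp, by rw [h2]; simp⟩
        · have hm0 : m = 0 := by omega
          subst hm0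
          simp only [Nat.lt_irrefl, if_false] at hstep ⊢
          rw [hstep]
          obtain ⟨h1, h2⟩ := ihx (acc ++ [s3l] ++ [[s2.getD i ' ']]) 0 true
          exact ⟨by rw [h1]; simp, by rw [h2]; simp⟩
      · simp only [hmt, if_false, decide_false, Bool.false_eq_true, List.nil_append] at hstep ⊢
        by_cases hs : 0 < s
        · simp only [hs, if_true, List.nil_append] at hstep ⊢
          rw [hstep]
          obtain ⟨h1, h2⟩ := ihx acc (s - 1) b
          exact ⟨by rw [h1], by rw [h2]⟩
        · have hs0 : s = 0 := by omega
          subst hs0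
          simp only [Nat.lt_irrefl, if_false] at hstep ⊢
          rw [hstep]
          obtain ⟨h1, h2⟩ := ihx (acc ++ [[s2.getD i ' ']]) 0 b
          exact ⟨by rw [h1]; simp, by rw [h2]⟩

theorem func_alt_eq (str1 str2 str3 : String) :
    func_alt str1 str2 str3 =
      (if occsFrom (PySem.Chars.lower str1.toList) (PySem.Chars.lower str2.toList) 0 = [] then ""
       else String.ofList (stitchF str2.toList str3.toList str1.toList.length
              (occsFrom (PySem.Chars.lower str1.toList) (PySem.Chars.lower str2.toList) 0) 0)) := by
  unfold func_alt
  simp only [PySem.Str.toList_lower]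
  set low1 := PySem.Chars.lower str1.toList with hl1
  set low2 := PySem.Chars.lower str2.toList with hl2
  have hlen : low2.length = str2.toList.length := by rw [hl2]; exact lower_length _
  obtain ⟨h1, h2⟩ := alt_fold low1 low2 str2.toList str3.toList str1.toList.length hlen 0
    (by omega) [] 0 false
  rw [show ((0 : Nat) : Int) = (0 : Int) by simp, hlen] at h1 h2
  rw [h1, h2, emitSM_eq_stitchF low1 low2 str2.toList str3.toList str1.toList.length hlen 0 0]
  by_cases hocc : occsFrom low1 low2 0 = [] <;> simp [hocc]
-- the j-th piece A emits, in Nat form (g j = list[j]); k = the number of matches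
def pieceA (s2 s3 : List Char) (m k : Nat) (g : Nat → Nat) (j : Nat) : List Char :=
  if j = 0 then
    s2.take (g 0) ++ s3 ++ (s2.drop (g 0 + m)).take (g 1 - (g 0 + m))
  else if j = k - 1 then
    s3 ++ s2.drop (g j + m)
  else
    s3 ++ (s2.drop (g j + m)).take (g (j + 1) - (g j + m))

theorem pieces_tail (s2 s3 : List Char) (m : Nat) (O : List Nat) (hk : 2 ≤ O.length) :
    ∀ (c j : Nat), j + c + 1 = O.length → 1 ≤ j →
      ((List.range' j (c + 1)).map (pieceA s2 s3 m O.length (fun t => O.getD t 0))).flatten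
        = s3 ++ stitchF s2 s3 m (O.drop (j + 1)) (O.getD j 0 + m) := by
  intro c
  induction c with
  | zero =>
    intro j hjc h1
    have hj : j = O.length - 1 := by omega
    rw [List.range'_one, List.map_singleton]
    unfold pieceA
    rw [if_neg (by omega), if_pos hj]
    have hdrop : O.drop (j + 1) = [] := List.drop_eq_nil_of_le (by omega)
    rw [hdrop]
    simp [stitchF]
  | succ c ihc =>
    intro j hjc h1
    rw [List.range'_succ, List.map_cons, List.flatten_cons]
    have hj1 : j + 1 < O.length := by omega
    rw [ihc (j + 1) (by omega) (by omega)]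
    unfold pieceA
    rw [if_neg (by omega), if_neg (by omega)]
    have hdrop : O.drop (j + 1) = O[j + 1] :: O.drop (j + 2) := List.drop_eq_getElem_cons hj1
    have hg : O.getD (j + 1) 0 = O[j + 1] := List.getD_eq_getElem O 0 hj1
    rw [hdrop]
    simp only [stitchF, hg]
    simp

theorem pieces_head (s2 s3 : List Char) (m : Nat) (O : List Nat) (hk : 2 ≤ O.length) :
    ((List.range O.length).map (pieceA s2 s3 m O.length (fun t => O.getD t 0))).flatten
      = stitchF s2 s3 m O 0 := by
  have hsplit : List.range O.length = 0 :: List.range' 1 (O.length - 2 + 1) := by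
    obtain ⟨c2, hc2⟩ : ∃ c2, O.length = c2 + 2 := ⟨O.length - 2, by omega⟩
    rw [hc2, List.range_eq_range', List.range'_succ]
    congr 1
  rw [hsplit, List.map_cons, List.flatten_cons,
    pieces_tail s2 s3 m O hk (O.length - 2) 1 (by omega) (by omega)]
  unfold pieceA
  rw [if_pos rfl]
  obtain ⟨o0, O1, hO⟩ : ∃ o0 O1, O = o0 :: O1 := by
    cases O with
    | nil => simp at hk
    | cons a t => exact ⟨a, t, rfl⟩
  subst hO
  obtain ⟨o1, O2, hO1⟩ : ∃ o1 O2, O1 = o1 :: O2 := by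
    cases O1 with
    | nil => simp at hk
    | cons a t => exact ⟨a, t, rfl⟩
  subst hO1
  simp only [List.getD_cons_zero, List.getD_cons_succ, List.drop_succ_cons, List.drop_zero]
  simp only [stitchF, List.drop_zero, Nat.sub_zero]
  simp [List.append_assoc]

-- A in closed form, for an index list of length ≠ 1
theorem func_eq (str1 str2 str3 : String) (hk : occCount str1 str2 ≠ 1) :
    func str1 str2 str3 =
      (if occsFrom (PySem.Chars.lower str1.toList) (PySem.Chars.lower str2.toList) 0 = [] then ""
       else String.ofList (stitchF str2.toList str3.toList str1.toList.length
              (occsFrom (PySem.Chars.lower str1.toList) (PySem.Chars.lower str2.toList) 0) 0)) := by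
  unfold func
  dsimp only
  set low1 := PySem.Chars.lower str1.toList with hl1
  set low2 := PySem.Chars.lower str2.toList with hl2
  set O := occsFrom low1 low2 0 with hO
  have hlenO : O.length = occCount str1 str2 := by
    rw [hO, occsFrom_eq_filter, Nat.sub_zero, ← List.range_eq_range', hl2, lower_length]
    rfl
  rw [findSubstringIndexes_eq str1 str2, ← hl1, ← hl2, ← hO]
  by_cases hnil : O = []
  · rw [if_pos hnil, hnil]
    simp
  · rw [if_neg hnil]
    have hk2 : 2 ≤ O.length := by
      have : O.length ≠ 0 := fun h => hnil (List.length_eq_zero_iff.mp h)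
      omega
    congr 1
    -- turn the fold into the flattened list of per-index pieces
    rw [PySem.List.foldl_append_eq_flatMap, List.nil_append]
    have hlen' : ((List.map (fun k : Nat => (k : Int)) O).length : Int) = (O.length : Int) := by
      simp
    rw [hlen', PySem.List.pyRange_zero_natCast, List.flatMap_def, List.map_map]
    rw [← pieces_head str2.toList str3.toList str1.toList.length O hk2]
    congr 1
    apply List.map_congr_left
    intro j hj
    rw [List.mem_range] at hj
    simp only [Function.comp_apply]
    have hgd : ∀ t : Nat, PySem.List.pyGetD (List.map (fun k : Nat => (k : Int)) O) ((t : Nat) : Int) 0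
        = ((O.getD t 0 : Nat) : Int) := by
      intro t
      rw [show (0 : Int) = ((0 : Nat) : Int) by simp, PySem.List.pyGetD_map,
        PySem.List.pyGetD_natCast]
    have hcast : ∀ t : Nat, ((O.getD t 0 : Nat) : Int) + (str1.toList.length : Int)
        = ((O.getD t 0 + str1.toList.length : Nat) : Int) := by intro t; push_cast; ring
    unfold pieceA
    by_cases h0 : j = 0
    · subst h0
      rw [if_pos (show ((0 : Nat) : Int) = 0 from Nat.cast_zero), if_pos rfl]
      rw [hgd 0, hcast 0, show ((0 : Nat) : Int) + 1 = ((1 : Nat) : Int) by omega,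
        hgd 1, PySem.List.slice_to_natCast, PySem.List.slice_natCast]
    · rw [if_neg (show ¬((j : Int) = 0) by exact_mod_cast h0), if_neg h0]
      by_cases hl : j = O.length - 1
      · rw [if_pos (show (j : Int) = (O.length : Int) - 1 by omega), if_pos hl]
        rw [hgd j, hcast j, PySem.List.slice_from_natCast]
      · rw [if_neg (show ¬((j : Int) = (O.length : Int) - 1) by omega), if_neg hl]
        rw [hgd j, hcast j, show ((j : Int) + 1) = ((j + 1 : Nat) : Int) by omega,
          hgd (j + 1), PySem.List.slice_natCast]

-- ===== VERDICT (by name: the statement is the Claim_ definition above) =====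
theorem func_spec : Claim_equal_func := by
  intro str1 str2 str3 _ hp
  unfold Spec_func
  rw [func_eq str1 str2 str3 hp, func_alt_eq str1 str2 str3]

theorem func_raises : Claim_raises_func := by
  unfold Claim_raises_func
  exact ⟨fun s1 s2 s3 _ hr hp => hp hr, by decide⟩

-- self-check: the raise-witness facts recorded above, read off func_raises
theorem pvRaiseWitness_func_ok :
    Raises_func pvRaiseWitness_func.1 pvRaiseWitness_func.2.1 pvRaiseWitness_func.2.2 ∧
      func_alt pvRaiseWitness_func.1 pvRaiseWitness_func.2.1 pvRaiseWitness_func.2.2 = pvRaiseWitnessOut_func :=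
  ⟨func_raises.2.2.1, func_raises.2.2.2⟩
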